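-- pv_equiv track=rewrite | github.com/ManojBoddula/job-chtbot | main.py | prioritize
-- ===== SOURCE A (Python) =====
-- INDIA_KEYWORDS = [
--     "india","bangalore","bengaluru","hyderabad",
--     "pune","chennai","mumbai","delhi","noida","gurgaon",
--     "kolkata","kochi","ahmedabad","jaipur","trivandrum"
-- ]
--
-- def prioritize(jobs):
--     india = []
--     others = []
--     for j in jobs:
--         loc = str(j.get("location", "")).lower()
--         desc = str(j.get("description", "")).lower()
--         if any(k in loc for k in INDIA_KEYWORDS) or "india" in loc or "india" in desc:
--             india.append(j)
--         elif "remote" in loc: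
--             india.append(j)
--         else:
--             others.append(j)
--     return india + others
-- ===== SOURCE B (Python) =====
-- INDIA_KEYWORDS = [
--     "india","bangalore","bengaluru","hyderabad",
--     "pune","chennai","mumbai","delhi","noida","gurgaon",
--     "kolkata","kochi","ahmedabad","jaipur","trivandrum"
-- ]
--
-- def _classify(j):
--     loc = str(j.get("location", "")).lower()
--     desc = str(j.get("description", "")).lower()
--     if any(k in loc for k in INDIA_KEYWORDS) or "india" in desc or "remote" in loc:
--         return 0
--     return 1
--
-- def prioritize(jobs):
--     return sorted(jobs, key=_classify)
-- ===== Notes on version B (the rewrite author's own statement) =====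
-- stated objective: idiomatic
-- what changed: Replaces the manual two-accumulator partition loop with a single stable sort by a binary classification key (sorted(jobs, key=classify)), relying on sort stability to preserve the relative order of each group; the redundant 'india in loc' test (subsumed by the keyword scan) is dropped.
import Mathlib
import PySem

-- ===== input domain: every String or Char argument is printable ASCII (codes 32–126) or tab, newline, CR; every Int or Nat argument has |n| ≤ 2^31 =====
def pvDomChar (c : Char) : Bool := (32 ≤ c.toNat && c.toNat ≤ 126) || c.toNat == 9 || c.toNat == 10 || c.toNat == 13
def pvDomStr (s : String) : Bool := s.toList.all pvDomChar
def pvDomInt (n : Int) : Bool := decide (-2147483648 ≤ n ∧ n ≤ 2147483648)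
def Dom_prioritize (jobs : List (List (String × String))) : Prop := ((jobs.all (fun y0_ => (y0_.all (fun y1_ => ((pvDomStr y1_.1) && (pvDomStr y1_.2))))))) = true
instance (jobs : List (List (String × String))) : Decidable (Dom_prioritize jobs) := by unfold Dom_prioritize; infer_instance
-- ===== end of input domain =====

-- B replaces A's two-accumulator partition loop by a stable sort on a binary
-- classification key (idiomatic `sorted(jobs, key=classify)`); same return value.


-- module-level constant INDIA_KEYWORDS (shared by A and B, as in the Python module)
def INDIA_KEYWORDS : List String :=
  ["india","bangalore","bengaluru","hyderabad",
   "pune","chennai","mumbai","delhi","noida","gurgaon",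
   "kolkata","kochi","ahmedabad","jaipur","trivandrum"]

-- ===== PORT A =====
-- one loop step of A: decide the branch and append j to india or others
def prioritizeStep (acc : List (List (String × String)) × List (List (String × String)))
    (j : List (String × String)) :
    List (List (String × String)) × List (List (String × String)) :=
  let loc := PySem.Str.lower ((PySem.Dict.mk j).getD "location" "")
  let desc := PySem.Str.lower ((PySem.Dict.mk j).getD "description" "")
  if INDIA_KEYWORDS.any (fun k => PySem.Str.isIn k loc) || PySem.Str.isIn "india" loc
      || PySem.Str.isIn "india" desc then
    (acc.1 ++ [j], acc.2)
  else if PySem.Str.isIn "remote" loc then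
    (acc.1 ++ [j], acc.2)
  else
    (acc.1, acc.2 ++ [j])

def prioritize (jobs : List (List (String × String))) : List (List (String × String)) :=
  let r := jobs.foldl prioritizeStep ([], [])
  r.1 ++ r.2

-- ===== PORT B =====
-- Source B's _classify: 0 for prioritized (India/remote) jobs, 1 otherwise
def pvClassify (j : List (String × String)) : Int :=
  let loc := PySem.Str.lower ((PySem.Dict.mk j).getD "location" "")
  let desc := PySem.Str.lower ((PySem.Dict.mk j).getD "description" "")
  if INDIA_KEYWORDS.any (fun k => PySem.Str.isIn k loc) || PySem.Str.isIn "india" desc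
      || PySem.Str.isIn "remote" loc then 0 else 1

def prioritize_alt (jobs : List (List (String × String))) : List (List (String × String)) :=
  PySem.List.sorted jobs pvClassify

-- ===== PRECONDITION & SPEC =====
def Spec_prioritize (jobs : List (List (String × String))) (out : List (List (String × String))) : Prop := out = prioritize_alt jobs
instance (jobs : List (List (String × String))) (out : List (List (String × String))) : Decidable (Spec_prioritize jobs out) := by unfold Spec_prioritize; infer_instance

-- ===== CLAIM (what is proved, stated in full; the proofs are below) =====
def Claim_equal_prioritize : Prop := ∀ (jobs : List (List (String × String))), Dom_prioritize jobs → Spec_prioritize jobs (prioritize jobs)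

-- ===== LEMMAS AND PROOFS =====

lemma pvClassify_cases (j : List (String × String)) : pvClassify j = 0 ∨ pvClassify j = 1 := by
  unfold pvClassify
  dsimp only
  split <;> simp

-- inserting x whose key is below every key in bs and not below any key in as
lemma insertBy_mid (bef : List (String × String) → List (String × String) → Bool)
    (x : List (String × String)) (as bs : List (List (String × String)))
    (h1 : ∀ a ∈ as, bef x a = false) (h2 : ∀ b ∈ bs, bef x b = true) :
    PySem.List.insertBy bef x (as ++ bs) = as ++ x :: bs := by
  induction as with
  | nil =>
    cases bs with
    | nil => simp [PySem.List.insertBy]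
    | cons b bs' => simp [PySem.List.insertBy, h2 b (by simp)]
  | cons a as' ih =>
    have ha : bef x a = false := h1 a (by simp)
    simp only [List.cons_append, PySem.List.insertBy, ha]
    simp only [Bool.false_eq_true, if_false]
    rw [ih (fun a' h => h1 a' (by simp [h]))]

-- the insertion-sort fold with binary keys keeps a (zeros ++ ones) shape
lemma fold_insert_partition (xs : List (List (String × String)))
    (as bs : List (List (String × String)))
    (ha : ∀ a ∈ as, pvClassify a = 0) (hb : ∀ b ∈ bs, pvClassify b = 1) :
    xs.foldl (fun acc x => PySem.List.insertBy
      (fun a b => decide (pvClassify a < pvClassify b)) x acc) (as ++ bs)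
    = (as ++ xs.filter (fun x => pvClassify x == 0))
      ++ (bs ++ xs.filter (fun x => !(pvClassify x == 0))) := by
  induction xs generalizing as bs with
  | nil => simp
  | cons x xs ih =>
    rcases pvClassify_cases x with h0 | h1
    · have hins : PySem.List.insertBy
          (fun a b => decide (pvClassify a < pvClassify b)) x (as ++ bs)
          = (as ++ [x]) ++ bs := by
        rw [insertBy_mid _ x as bs
          (fun a hma => by simp [h0, ha a hma])
          (fun b hmb => by simp [h0, hb b hmb])]
        simp
      simp only [List.foldl_cons, hins]
      rw [ih (as ++ [x]) bs
        (by intro a hma; rcases List.mem_append.mp hma with h | h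
            · exact ha a h
            · simp at h; simpa [h] using h0) hb]
      simp [h0]
    · have hins : PySem.List.insertBy
          (fun a b => decide (pvClassify a < pvClassify b)) x (as ++ bs)
          = as ++ (bs ++ [x]) := by
        have := insertBy_mid (fun a b => decide (pvClassify a < pvClassify b)) x (as ++ bs) []
          (by intro a hma
              rcases List.mem_append.mp hma with h | h
              · simp [h1, ha a h]
              · simp [h1, hb a h])
          (by intro b hmb; simp at hmb)
        simpa using this
      simp only [List.foldl_cons, hins]
      rw [ih as (bs ++ [x]) ha
        (by intro b hmb; rcases List.mem_append.mp hmb with h | h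
            · exact hb b h
            · simp at h; simpa [h] using h1)]
      simp [h1]

lemma alt_eq_filters (jobs : List (List (String × String))) :
    prioritize_alt jobs
    = jobs.filter (fun x => pvClassify x == 0)
      ++ jobs.filter (fun x => !(pvClassify x == 0)) := by
  unfold prioritize_alt
  rw [PySem.List.sorted_eq_foldl_insertBy]
  have := fold_insert_partition jobs [] [] (by simp) (by simp)
  simpa using this

-- A's branch structure collapses to B's single test: "india" in loc is subsumed
-- by the keyword scan (whose first keyword is "india")
lemma branch_eq (loc desc : String) {α : Type} (X Y : α) :
    (if (INDIA_KEYWORDS.any (fun k => PySem.Str.isIn k loc) || PySem.Str.isIn "india" loc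
        || PySem.Str.isIn "india" desc) then X
     else if PySem.Str.isIn "remote" loc then X else Y)
    = (if ((if (INDIA_KEYWORDS.any (fun k => PySem.Str.isIn k loc) || PySem.Str.isIn "india" desc
        || PySem.Str.isIn "remote" loc) then (0 : Int) else 1) == 0) then X else Y) := by
  have hsub : PySem.Str.isIn "india" loc = true →
      (INDIA_KEYWORDS.any fun k => PySem.Str.isIn k loc) = true := by
    intro h
    simp [INDIA_KEYWORDS] at h ⊢
    tauto
  cases hiL : PySem.Str.isIn "india" loc
  · cases hK : (INDIA_KEYWORDS.any fun k => PySem.Str.isIn k loc) <;>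
      cases hiD : PySem.Str.isIn "india" desc <;>
      cases hR : PySem.Str.isIn "remote" loc <;>
      simp
  · simp only [hsub hiL]
    simp

-- A's fold keeps (india, others) = (prefix with pvClassify = 0, rest)
lemma A_fold (xs : List (List (String × String))) (i o : List (List (String × String))) :
    xs.foldl prioritizeStep (i, o)
    = (i ++ xs.filter (fun x => pvClassify x == 0),
       o ++ xs.filter (fun x => !(pvClassify x == 0))) := by
  induction xs generalizing i o with
  | nil => simp
  | cons x xs ih =>
    have hstep : prioritizeStep (i, o) x
        = if pvClassify x == 0 then (i ++ [x], o) else (i, o ++ [x]) := by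
      unfold prioritizeStep pvClassify
      dsimp only
      exact branch_eq _ _ _ _
    simp only [List.foldl_cons, hstep]
    by_cases h : pvClassify x == 0
    · rw [if_pos h, ih]
      simp [h]
    · rw [if_neg h, ih]
      simp [h]

-- ===== VERDICT (by name: the statement is the Claim_ definition above) =====
theorem prioritize_spec : Claim_equal_prioritize := by
  intro jobs _
  unfold Spec_prioritize prioritize
  rw [alt_eq_filters]
  have := A_fold jobs [] []
  simp only [this]
  simp
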